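-- pv_equiv track=rewrite | github.com/orionSX/python | lab2/alltasks.py | divisor_copr_w_dig
-- ===== SOURCE A (Python) =====
-- def euclid(x,y):
--     while y!=0:
--         x,y=y,x%y
--     return x
--
-- def divisor_copr_w_dig(n):
--     divisors=[x for x in range(2,n+1) if n%x==0]
--     digits=[int(x) for x in str(n)]
--     k=[0]*len(divisors)
--
--     for x in divisors:
--         c=0
--         for y in digits:
--             if y!=0:
--                 if euclid(x,y)==1:
--                     c+=1
--         k[divisors.index(x)]=c
--
--     return max(k),divisors[k.index(max(k))]
-- ===== SOURCE B (Python) =====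
-- def _gcd(a, b):
--     return a if b == 0 else _gcd(b, a % b)
--
-- def divisor_copr_w_dig(n):
--     # enumerate divisors >= 2 in ascending order in O(sqrt(n))
--     small, large = [], []
--     i = 1
--     while i * i <= n:
--         if n % i == 0:
--             if i > 1:
--                 small.append(i)
--             j = n // i
--             if j != i and j > 1:
--                 large.append(j)
--         i += 1
--     divisors = small + large[::-1]
--     # digit-frequency table: the per-divisor digit scan becomes a fixed 1..9 sweep
--     freq = [0] * 10
--     for ch in str(n):
--         freq[int(ch)] += 1
--     best = None
--     for x in divisors:
--         c = sum(freq[y] for y in range(1, 10) if _gcd(x, y) == 1)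
--         if best is None or c > best[0]:
--             best = (c, x)
--     return best
-- ===== Notes on version B (the rewrite author's own statement) =====
-- stated objective: faster
-- what changed: B enumerates divisors in pairs up to sqrt(n) (O(sqrt n) instead of scanning 2..n), replaces the per-divisor digit scan by a digit-frequency table swept over 1..9, and keeps a running first-maximum pair instead of A's k-list with list.index lookups and two max passes.
-- outside the precondition, e.g. on divisor_copr_w_dig(1): A raises ValueError, B returns None
import Mathlib
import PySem

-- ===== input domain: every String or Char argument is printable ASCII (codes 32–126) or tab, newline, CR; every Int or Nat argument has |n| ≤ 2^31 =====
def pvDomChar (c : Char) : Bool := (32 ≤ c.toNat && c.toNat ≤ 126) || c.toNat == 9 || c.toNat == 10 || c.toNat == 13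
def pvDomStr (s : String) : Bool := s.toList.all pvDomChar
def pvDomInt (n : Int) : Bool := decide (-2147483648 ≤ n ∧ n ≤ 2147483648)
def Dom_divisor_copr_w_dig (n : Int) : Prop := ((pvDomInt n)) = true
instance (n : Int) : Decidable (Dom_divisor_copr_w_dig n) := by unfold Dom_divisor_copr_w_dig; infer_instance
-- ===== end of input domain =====

-- B enumerates divisors in O(sqrt n) paired form instead of scanning 2..n, uses a digit-frequency
-- table swept over 1..9 instead of a per-divisor digit scan, and a running first-maximum instead of
-- A's k-list with index lookups and two max passes (objective: faster).


-- ===== PORT A =====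
-- while y != 0: x, y = y, x % y   (fuel makes the loop total; |y| strictly decreases, so |y|+1 steps suffice)
def euclidGo (fuel : Nat) (x y : Int) : Int :=
  match fuel with
  | 0 => x
  | fuel + 1 => if y = 0 then x else euclidGo fuel y (PySem.Int.mod x y)

def pyEuclid (x y : Int) : Int := euclidGo (y.natAbs + 1) x y

-- A's inner loop: c = 0; for y in digits: if y != 0: if euclid(x, y) == 1: c += 1
def aCount (digits : List Int) (x : Int) : Int :=
  digits.foldl (fun c y => if y ≠ 0 then (if pyEuclid x y = 1 then c + 1 else c) else c) 0

def divisor_copr_w_dig (n : Int) : Int × Int :=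
  let divisors := (PySem.List.pyRange 2 (n+1) 1).filter (fun x => PySem.Int.mod n x == 0)
  let digits := (PySem.Int.toChars n).map (fun c => (PySem.Int.ofChars? [c]).getD 0)
  let k0 := List.replicate divisors.length (0 : Int)
  let k := divisors.foldl (fun k x =>
      let c := aCount digits x
      match PySem.List.index? divisors x with
      | some i => PySem.List.pySetD k (i : Int) c
      | none => k) k0
  let m := (PySem.List.max? k (fun v => v)).getD 0
  let j := (PySem.List.index? k m).getD 0
  (m, PySem.List.pyGetD divisors (j : Int) 0)

-- ===== PORT B =====
-- return a if b == 0 else _gcd(b, a % b)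
def gcdGo (fuel : Nat) (a b : Int) : Int :=
  match fuel with
  | 0 => a
  | fuel + 1 => if b = 0 then a else gcdGo fuel b (PySem.Int.mod a b)

def pyGcd (a b : Int) : Int := gcdGo (b.natAbs + 1) a b

-- B's while loop: i = 1; while i*i <= n: if n % i == 0: … ; i += 1
-- (fuel makes the loop total; i grows by 1 each step, so n+1-i steps suffice)
def bDivGo (fuel : Nat) (n i : Int) (small large : List Int) : List Int × List Int :=
  match fuel with
  | 0 => (small, large)
  | fuel + 1 =>
    if i * i ≤ n then
      let sl :=
        if PySem.Int.mod n i = 0 then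
          (if 1 < i then small ++ [i] else small,
           if PySem.Int.floordiv n i ≠ i ∧ 1 < PySem.Int.floordiv n i
             then large ++ [PySem.Int.floordiv n i] else large)
        else (small, large)
      bDivGo fuel n (i + 1) sl.1 sl.2
    else (small, large)

def bDivLoop (n i : Int) (small large : List Int) : List Int × List Int :=
  bDivGo (n + 1 - i).toNat n i small large

-- c = sum(freq[y] for y in range(1, 10) if _gcd(x, y) == 1)
def bCount (freq : List Int) (x : Int) : Int :=
  (PySem.List.pyRange 1 10 1).foldl
    (fun s y => if pyGcd x y = 1 then s + PySem.List.pyGetD freq y 0 else s) 0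

def divisor_copr_w_dig_alt (n : Int) : Int × Int :=
  let sl := bDivLoop n 1 [] []
  let divisors := sl.1 ++ (PySem.List.slice? sl.2 none none (-1)).getD []
  let freq := (PySem.Int.toChars n).foldl
      (fun f ch =>
        let d := (PySem.Int.ofChars? [ch]).getD 0
        PySem.List.pySetD f d (PySem.List.pyGetD f d 0 + 1))
      (List.replicate 10 (0 : Int))
  let best := divisors.foldl
      (fun b x =>
        let c := bCount freq x
        match b with
        | none => some (c, x)
        | some p => if c > p.1 then some (c, x) else some p)
      (none : Option (Int × Int))
  match best with
  | some p => p
  | none => (0, 0)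

-- ===== PRECONDITION & SPEC =====
-- Pre_ excludes exactly n ≤ 1, where A's `max(k)` is applied to an empty list and raises ValueError.
def Pre_divisor_copr_w_dig (n : Int) : Prop := 2 ≤ n
instance (n : Int) : Decidable (Pre_divisor_copr_w_dig n) := by unfold Pre_divisor_copr_w_dig; infer_instance
def pvWitness_divisor_copr_w_dig : Int := 12

def Spec_divisor_copr_w_dig (n : Int) (out : Int × Int) : Prop := out = divisor_copr_w_dig_alt n
instance (n : Int) (out : Int × Int) : Decidable (Spec_divisor_copr_w_dig n out) := by unfold Spec_divisor_copr_w_dig; infer_instance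

-- ===== CLAIM (what is proved, stated in full; the proofs are below) =====
def Claim_equal_divisor_copr_w_dig : Prop := ∀ (n : Int), Dom_divisor_copr_w_dig n → Pre_divisor_copr_w_dig n → Spec_divisor_copr_w_dig n (divisor_copr_w_dig n)

-- ===== LEMMAS AND PROOFS =====

theorem euclidGo_eq_gcdGo : ∀ (fuel : Nat) (x y : Int), euclidGo fuel x y = gcdGo fuel x y := by
  intro fuel
  induction fuel with
  | zero => intro x y; rfl
  | succ fuel ih =>
    intro x y
    rw [euclidGo, gcdGo]
    by_cases hy : y = 0
    · simp [hy]
    · simp only [hy, if_false]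
      exact ih y (PySem.Int.mod x y)

theorem euclid_eq_gcd (x y : Int) : pyEuclid x y = pyGcd x y :=
  euclidGo_eq_gcdGo (y.natAbs + 1) x y

-- closed form of B's divisor loop
theorem bDivGo_eq (n : Int) : ∀ (fuel : Nat) (i : Int), (n + 1 - i).toNat ≤ fuel → 1 ≤ i →
    ∀ (s l : List Int),
    bDivGo fuel n i s l =
      (s ++ (PySem.List.pyRange i (n+1) 1).filter
          (fun d => decide (d*d ≤ n) && decide (1 < d) && decide (PySem.Int.mod n d = 0)),
       l ++ ((PySem.List.pyRange i (n+1) 1).filter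
          (fun d => decide (d*d ≤ n) && decide (PySem.Int.mod n d = 0) &&
                    decide (PySem.Int.floordiv n d ≠ d) && decide (1 < PySem.Int.floordiv n d))).map
          (fun d => PySem.Int.floordiv n d)) := by
  intro fuel
  induction fuel with
  | zero =>
    intro i hfuel hi s l
    have hni : n + 1 ≤ i := by omega
    rw [bDivGo, PySem.List.pyRange_one_eq_nil hni]
    simp
  | succ fuel ih =>
    intro i hfuel hi s l
    rw [bDivGo]
    by_cases hle : i * i ≤ n
    · -- loop body runs; i ≤ n, so the range is a cons
      have hii : i ≤ i * i := by nlinarith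
      have hin : i < n + 1 := by omega
      simp only [hle, if_true]
      rw [PySem.List.pyRange_one_cons hin]
      have hrec := ih (i+1) (by omega) (by omega)
      rw [hrec]
      rw [List.filter_cons, List.filter_cons]
      by_cases hmod : PySem.Int.mod n i = 0
      · by_cases h1i : 1 < i <;> by_cases hfi : PySem.Int.floordiv n i = i <;>
          by_cases hgt : 1 < PySem.Int.floordiv n i <;>
          simp [hmod, h1i, hfi, hgt, hle, List.append_assoc]
      · simp [hmod, hle]
    · -- loop exits; everything remaining in the range fails d*d ≤ n
      simp only [hle, if_false]
      have hnil1 : (PySem.List.pyRange i (n+1) 1).filter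
          (fun d => decide (d*d ≤ n) && decide (1 < d) && decide (PySem.Int.mod n d = 0)) = [] := by
        rw [List.filter_eq_nil_iff]
        intro d hd
        rw [PySem.List.mem_pyRange_one] at hd
        have : ¬ d * d ≤ n := by nlinarith
        simp [this]
      have hnil2 : (PySem.List.pyRange i (n+1) 1).filter
          (fun d => decide (d*d ≤ n) && decide (PySem.Int.mod n d = 0) &&
                    decide (PySem.Int.floordiv n d ≠ d) && decide (1 < PySem.Int.floordiv n d)) = [] := by
        rw [List.filter_eq_nil_iff]
        intro d hd
        rw [PySem.List.mem_pyRange_one] at hd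
        have : ¬ d * d ≤ n := by nlinarith
        simp [this]
      rw [hnil1, hnil2]
      simp

theorem bDivLoop_eq (n i : Int) (hi : 1 ≤ i) (s l : List Int) :
    bDivLoop n i s l =
      (s ++ (PySem.List.pyRange i (n+1) 1).filter
          (fun d => decide (d*d ≤ n) && decide (1 < d) && decide (PySem.Int.mod n d = 0)),
       l ++ ((PySem.List.pyRange i (n+1) 1).filter
          (fun d => decide (d*d ≤ n) && decide (PySem.Int.mod n d = 0) &&
                    decide (PySem.Int.floordiv n d ≠ d) && decide (1 < PySem.Int.floordiv n d))).map
          (fun d => PySem.Int.floordiv n d)) :=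
  bDivGo_eq n (n + 1 - i).toNat i (le_refl _) hi s l

-- exact quotient of a division
theorem floordiv_exact (d q n : Int) (hd : 0 < d) (hq : n = d * q) :
    PySem.Int.floordiv n d = q := by
  rw [PySem.Int.floordiv_eq_ediv_of_pos hd, hq, Int.mul_ediv_cancel_left q (ne_of_gt hd)]

-- B's divisor list equals A's
theorem divisors_eq (n : Int) (hn : 2 ≤ n) :
    (bDivLoop n 1 [] []).1 ++ ((bDivLoop n 1 [] []).2).reverse
      = (PySem.List.pyRange 2 (n+1) 1).filter (fun x => PySem.Int.mod n x == 0) := by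
  have hB := bDivLoop_eq n 1 (le_refl 1) [] []
  rw [hB]
  simp only [List.nil_append]
  set S := (PySem.List.pyRange 1 (n+1) 1).filter
      (fun d => decide (d*d ≤ n) && decide (1 < d) && decide (PySem.Int.mod n d = 0)) with hS
  set F2 := (PySem.List.pyRange 1 (n+1) 1).filter
      (fun d => decide (d*d ≤ n) && decide (PySem.Int.mod n d = 0) &&
                decide (PySem.Int.floordiv n d ≠ d) && decide (1 < PySem.Int.floordiv n d)) with hF2
  set M := F2.map (fun d => PySem.Int.floordiv n d) with hM
  set Dn := (PySem.List.pyRange 2 (n+1) 1).filter (fun x => PySem.Int.mod n x == 0) with hDn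
  have hSmem : ∀ x, x ∈ S ↔ (1 ≤ x ∧ x < n+1) ∧ (x*x ≤ n ∧ 1 < x ∧ PySem.Int.mod n x = 0) := by
    intro x
    simp [hS, List.mem_filter, PySem.List.mem_pyRange_one, and_assoc]
  have hF2mem : ∀ d, d ∈ F2 ↔ (1 ≤ d ∧ d < n+1) ∧ d*d ≤ n ∧ PySem.Int.mod n d = 0 ∧
      PySem.Int.floordiv n d ≠ d ∧ 1 < PySem.Int.floordiv n d := by
    intro d
    simp [hF2, List.mem_filter, PySem.List.mem_pyRange_one, and_assoc]
  have hDnmem : ∀ x, x ∈ Dn ↔ (2 ≤ x ∧ x < n+1) ∧ PySem.Int.mod n x = 0 := by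
    intro x
    simp [hDn, List.mem_filter, PySem.List.mem_pyRange_one, and_assoc]
  -- membership
  have hmem : ∀ x, x ∈ S ++ M.reverse ↔ x ∈ Dn := by
    intro x
    rw [List.mem_append, List.mem_reverse, hDnmem x]
    constructor
    · rintro (hx | hx)
      · rw [hSmem x] at hx
        obtain ⟨⟨h1, h2⟩, h3, h4, h5⟩ := hx
        exact ⟨⟨by omega, h2⟩, h5⟩
      · rw [hM, List.mem_map] at hx
        obtain ⟨d, hd, rfl⟩ := hx
        rw [hF2mem d] at hd
        obtain ⟨⟨hd1, hd2⟩, hdd, hdm, hne, hgt⟩ := hd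
        obtain ⟨q, hq⟩ := (PySem.Int.mod_eq_zero_iff_dvd n d).mp hdm
        have hfd : PySem.Int.floordiv n d = q := floordiv_exact d q n (by omega) hq
        rw [hfd] at hgt hne ⊢
        have hq0 : (0:Int) ≤ q := by omega
        have hmul : 1 * q ≤ d * q := mul_le_mul_of_nonneg_right (by omega) hq0
        have hqn : q ≤ n := by rw [one_mul] at hmul; linarith [hq, hmul]
        refine ⟨⟨by omega, by omega⟩, ?_⟩
        exact (PySem.Int.mod_eq_zero_iff_dvd n q).mpr ⟨d, by rw [hq]; ring⟩
    · rintro ⟨⟨h2x, hxn⟩, hmod⟩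
      obtain ⟨q, hq⟩ := (PySem.Int.mod_eq_zero_iff_dvd n x).mp hmod
      have hq1 : 1 ≤ q := by
        by_contra hq0
        push_neg at hq0
        have hxq : x * q ≤ 0 := mul_nonpos_of_nonneg_of_nonpos (by omega) (by omega)
        linarith [hq, hxq]
      by_cases hxx : x * x ≤ n
      · left
        rw [hSmem x]
        exact ⟨⟨by omega, hxn⟩, hxx, by omega, hmod⟩
      · right
        have hqx : q < x := by nlinarith
        have hfq : PySem.Int.floordiv n q = x := floordiv_exact q x n (by omega) (by rw [hq]; ring)
        rw [hM, List.mem_map]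
        refine ⟨q, ?_, hfq⟩
        rw [hF2mem q]
        have hqn : q ≤ n := by nlinarith
        refine ⟨⟨hq1, by omega⟩, by nlinarith, ?_, by rw [hfq]; omega, by rw [hfq]; omega⟩
        exact (PySem.Int.mod_eq_zero_iff_dvd n q).mpr ⟨x, by rw [hq]; ring⟩
  -- order
  have hpairS : S.Pairwise (· < ·) :=
    List.Pairwise.sublist List.filter_sublist (PySem.List.pairwise_lt_pyRange_one 1 (n+1))
  have hpairF2 : F2.Pairwise (· < ·) :=
    List.Pairwise.sublist List.filter_sublist (PySem.List.pairwise_lt_pyRange_one 1 (n+1))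
  have hpairM : M.Pairwise (fun a b => b < a) := by
    rw [hM, List.pairwise_map]
    have h := List.Pairwise.and_mem.mp hpairF2
    refine h.imp ?_
    rintro a b ⟨ha, hb, hab⟩
    rw [hF2mem a] at ha
    rw [hF2mem b] at hb
    obtain ⟨⟨ha1, _⟩, _, ham, _, _⟩ := ha
    obtain ⟨⟨hb1, _⟩, _, hbm, _, _⟩ := hb
    obtain ⟨qa, hqa⟩ := (PySem.Int.mod_eq_zero_iff_dvd n a).mp ham
    obtain ⟨qb, hqb⟩ := (PySem.Int.mod_eq_zero_iff_dvd n b).mp hbm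
    have hfa : PySem.Int.floordiv n a = qa := floordiv_exact a qa n (by omega) hqa
    have hfb : PySem.Int.floordiv n b = qb := floordiv_exact b qb n (by omega) hqb
    rw [hfa, hfb]
    have hqa1 : 1 ≤ qa := by nlinarith
    have hqb1 : 1 ≤ qb := by nlinarith
    nlinarith
  have hpairRev : M.reverse.Pairwise (· < ·) := List.pairwise_reverse.mpr hpairM
  have hcross : ∀ a ∈ S, ∀ b ∈ M.reverse, a < b := by
    intro a ha b hb
    rw [hSmem a] at ha
    rw [List.mem_reverse, hM, List.mem_map] at hb
    obtain ⟨⟨ha1, _⟩, haa, _, _⟩ := ha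
    obtain ⟨d, hd, rfl⟩ := hb
    rw [hF2mem d] at hd
    obtain ⟨⟨hd1, _⟩, hdd, hdm, hne, hgt⟩ := hd
    obtain ⟨q, hq⟩ := (PySem.Int.mod_eq_zero_iff_dvd n d).mp hdm
    have hfd : PySem.Int.floordiv n d = q := floordiv_exact d q n (by omega) hq
    rw [hfd] at hne hgt ⊢
    have hd0 : (0:Int) < d := by omega
    have hmul : d * d ≤ d * q := hq ▸ hdd
    have hdq : d < q := lt_of_le_of_ne (le_of_mul_le_mul_left hmul hd0) (Ne.symm hne)
    by_contra hab
    push_neg at hab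
    have h1 : q * q ≤ a * a := mul_le_mul hab hab (by omega) (by omega)
    have h2 : d * q < q * q := mul_lt_mul_of_pos_right hdq (by omega)
    linarith [hq, haa, h1, h2]
  have hpairB : (S ++ M.reverse).Pairwise (· < ·) :=
    List.pairwise_append.mpr ⟨hpairS, hpairRev, hcross⟩
  have hpairDn : Dn.Pairwise (· < ·) :=
    List.Pairwise.sublist List.filter_sublist (PySem.List.pairwise_lt_pyRange_one 2 (n+1))
  have hnodupB : (S ++ M.reverse).Nodup := hpairB.imp (fun h => ne_of_lt h)
  have hnodupDn : Dn.Nodup := hpairDn.imp (fun h => ne_of_lt h)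
  have hperm : (S ++ M.reverse).Perm Dn := (List.perm_ext_iff_of_nodup hnodupB hnodupDn).mpr hmem
  have h1 := PySem.List.sorted_eq_self_of_pairwise Dn (fun x => x) (hpairDn.imp (fun h => le_of_lt h))
  have h2 := PySem.List.sorted_eq_of_perm_of_pairwise_lt Dn (S ++ M.reverse) (fun x => x) hperm hpairB
  exact h2.symm.trans h1

-- every char str(n) produces, n ≥ 0, is a digit char
theorem toDigitsCore_mem : ∀ (f m : Nat) (acc : List Char) (c : Char),
    c ∈ Nat.toDigitsCore 10 f m acc → c ∈ acc ∨ ∃ v : Nat, v < 10 ∧ c = Nat.digitChar v := by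
  intro f
  induction f with
  | zero => intro m acc c hc; exact Or.inl hc
  | succ f ih =>
    intro m acc c hc
    rw [Nat.toDigitsCore] at hc
    by_cases h : m / 10 = 0
    · simp only [h, if_true] at hc
      rcases List.mem_cons.mp hc with h' | h'
      · exact Or.inr ⟨m % 10, Nat.mod_lt _ (by omega), h'⟩
      · exact Or.inl h'
    · simp only [h, if_false] at hc
      rcases ih (m / 10) (Nat.digitChar (m % 10) :: acc) c hc with h' | h'
      · rcases List.mem_cons.mp h' with h'' | h''
        · exact Or.inr ⟨m % 10, Nat.mod_lt _ (by omega), h''⟩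
        · exact Or.inl h''
      · exact Or.inr h'

theorem digitVal : ∀ v : Nat, v < 10 → (PySem.Int.ofChars? [Nat.digitChar v]).getD 0 = (v : Int) := by
  intro v hv
  interval_cases v <;> decide

theorem digits_range (n : Int) (hn : 0 ≤ n) :
    ∀ y ∈ (PySem.Int.toChars n).map (fun c => (PySem.Int.ofChars? [c]).getD 0), 0 ≤ y ∧ y < 10 := by
  intro y hy
  rw [List.mem_map] at hy
  obtain ⟨c, hc, rfl⟩ := hy
  have hneg : ¬ n < 0 := not_lt.mpr hn
  rw [PySem.Int.toChars, if_neg hneg] at hc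
  rw [Nat.toDigits] at hc
  rcases toDigitsCore_mem _ _ _ _ hc with h | ⟨v, hv, rfl⟩
  · simp at h
  · rw [digitVal v hv]
    constructor
    · positivity
    · exact_mod_cast hv

theorem pyGetD_pySetD_int (f : List Int) (a y v : Int) (ha0 : 0 ≤ a) (halen : a < (f.length : Int))
    (hy0 : 0 ≤ y) :
    PySem.List.pyGetD (PySem.List.pySetD f a v) y 0 = if y = a then v else PySem.List.pyGetD f y 0 := by
  have h1 : a = ((a.toNat : Nat) : Int) := (Int.toNat_of_nonneg ha0).symm
  have h2 : y = ((y.toNat : Nat) : Int) := (Int.toNat_of_nonneg hy0).symm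
  rw [h1, h2, PySem.List.pyGetD_pySetD_natCast f a.toNat y.toNat v 0 (by omega)]
  by_cases hc : y.toNat = a.toNat
  · simp [hc]
  · rw [if_neg hc, if_neg (by omega : ¬ ((y.toNat : Int) = (a.toNat : Int)))]

-- frequency-table invariant: freq[y] = count of y so far
theorem freq_spec : ∀ (vals : List Int) (f : List Int), f.length = 10 →
    (∀ d ∈ vals, 0 ≤ d ∧ d < 10) →
    (vals.foldl (fun f d => PySem.List.pySetD f d (PySem.List.pyGetD f d 0 + 1)) f).length = 10 ∧
    ∀ y : Int, 0 ≤ y → y < 10 →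
      PySem.List.pyGetD (vals.foldl (fun f d => PySem.List.pySetD f d (PySem.List.pyGetD f d 0 + 1)) f) y 0
        = PySem.List.pyGetD f y 0 + (vals.count y : Int) := by
  intro vals
  induction vals with
  | nil => intro f hf _; simp [hf]
  | cons d t ih =>
    intro f hf hmem
    have hd := hmem d (List.mem_cons_self)
    have hf' : (PySem.List.pySetD f d (PySem.List.pyGetD f d 0 + 1)).length = 10 := by
      rw [PySem.List.length_pySetD]; exact hf
    obtain ⟨hlen, hget⟩ := ih _ hf' (fun u hu => hmem u (List.mem_cons_of_mem _ hu))
    refine ⟨by simpa [List.foldl_cons] using hlen, ?_⟩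
    intro y hy0 hy10
    rw [List.foldl_cons, hget y hy0 hy10,
        pyGetD_pySetD_int f d y _ hd.1 (by rw [hf]; exact_mod_cast hd.2) hy0]
    have hcnt : ((d :: t).count y : Int) = (t.count y : Int) + (if y = d then 1 else 0) := by
      rw [List.count_cons]
      by_cases h : y = d
      · simp [h]
      · have h' : ¬ d = y := fun hh => h hh.symm
        simp [h, h']
    rw [hcnt]
    split_ifs with h
    · subst h; omega
    · omega

-- A's inner loop as a weighted sum
theorem aCount_sum (x : Int) : ∀ (vals : List Int) (c0 : Int),
    vals.foldl (fun c y => if y ≠ 0 then (if pyEuclid x y = 1 then c + 1 else c) else c) c0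
      = c0 + (vals.map (fun y => if y ≠ 0 ∧ pyGcd x y = 1 then (1:Int) else 0)).sum := by
  intro vals
  induction vals with
  | nil => intro c0; simp
  | cons y t ih =>
    intro c0
    rw [List.foldl_cons, List.map_cons, List.sum_cons]
    by_cases h1 : y ≠ 0
    · by_cases h2 : pyGcd x y = 1
      · rw [if_pos h1, if_pos (by rw [euclid_eq_gcd]; exact h2), ih, if_pos ⟨h1, h2⟩]; ring
      · rw [if_pos h1, if_neg (by rw [euclid_eq_gcd]; exact h2), ih,
            if_neg (by rintro ⟨_, h⟩; exact h2 h)]; ring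
    · rw [if_neg h1, ih, if_neg (by rintro ⟨h, _⟩; exact h1 h)]; ring

-- a guarded accumulating fold is a sum (B's generator-sum)
theorem foldl_if_add (g : Int → Prop) [DecidablePred g] (f : Int → Int) :
    ∀ (l : List Int) (s0 : Int),
    l.foldl (fun s y => if g y then s + f y else s) s0
      = s0 + (l.map (fun y => if g y then f y else 0)).sum := by
  intro l
  induction l with
  | nil => intro s0; simp
  | cons y t ih =>
    intro s0
    rw [List.foldl_cons, List.map_cons, List.sum_cons]
    by_cases h : g y
    · rw [if_pos h, ih, if_pos h]; ring
    · rw [if_neg h, ih, if_neg h]; ring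

-- weighted digit sum = frequency sweep over 1..9
theorem wsum (x : Int) : ∀ (vals : List Int), (∀ y ∈ vals, 0 ≤ y ∧ y < 10) →
    (vals.map (fun y => if y ≠ 0 ∧ pyGcd x y = 1 then (1:Int) else 0)).sum
      = (([1,2,3,4,5,6,7,8,9] : List Int).map
          (fun v => if pyGcd x v = 1 then (vals.count v : Int) else 0)).sum := by
  intro vals
  induction vals with
  | nil => simp
  | cons y t ih =>
    intro hmem
    have hy := hmem y (by simp)
    rw [List.map_cons, List.sum_cons, ih (fun u hu => hmem u (List.mem_cons_of_mem _ hu))]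
    have hterm : ∀ v : Int, (if pyGcd x v = 1 then (((y :: t).count v : Nat) : Int) else 0)
        = (if pyGcd x v = 1 then ((t.count v : Nat) : Int) else 0)
          + (if v = y ∧ pyGcd x v = 1 then 1 else 0) := by
      intro v
      by_cases hg : pyGcd x v = 1
      · by_cases hv : v = y
        · subst hv
          simp [hg, List.count_cons]
        · have h' : ¬ y = v := fun hh => hv hh.symm
          simp [hg, hv, List.count_cons, h']
      · simp [hg]
    simp only [hterm]
    rw [show ∀ (l : List Int) (f g : Int → Int),
        (l.map (fun v => f v + g v)).sum = (l.map f).sum + (l.map g).sum from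
      fun l f g => by
        induction l with
        | nil => simp
        | cons a l ihl => simp [ihl]; ring]
    have hδ : (([1,2,3,4,5,6,7,8,9] : List Int).map
        (fun v => if v = y ∧ pyGcd x v = 1 then (1:Int) else 0)).sum
        = (if y ≠ 0 ∧ pyGcd x y = 1 then 1 else 0) := by
      obtain ⟨hy0, hy10⟩ := hy
      interval_cases y <;> simp
    rw [hδ]
    ring

-- the per-divisor counts agree
theorem counts_eq (x : Int) (vals freq : List Int) (hv : ∀ y ∈ vals, 0 ≤ y ∧ y < 10)
    (hf : ∀ y : Int, 0 ≤ y → y < 10 → PySem.List.pyGetD freq y 0 = (vals.count y : Int)) :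
    aCount vals x = bCount freq x := by
  rw [aCount, aCount_sum, bCount]
  rw [show PySem.List.pyRange 1 10 1 = [1,2,3,4,5,6,7,8,9] from by decide]
  rw [foldl_if_add (fun y => pyGcd x y = 1) (fun y => PySem.List.pyGetD freq y 0)]
  rw [wsum x vals hv]
  simp only [zero_add, List.map, List.sum_cons, List.sum_nil]
  rw [hf 1 (by norm_num) (by norm_num), hf 2 (by norm_num) (by norm_num),
      hf 3 (by norm_num) (by norm_num), hf 4 (by norm_num) (by norm_num),
      hf 5 (by norm_num) (by norm_num), hf 6 (by norm_num) (by norm_num),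
      hf 7 (by norm_num) (by norm_num), hf 8 (by norm_num) (by norm_num),
      hf 9 (by norm_num) (by norm_num)]

-- A's k-array fold produces the list of counts
theorem kfold (dg : List Int) (D : List Int) (hD : D.Nodup) :
    ∀ (r p : List Int), D = p ++ r →
    r.foldl (fun k x =>
        let c := aCount dg x
        match PySem.List.index? D x with
        | some i => PySem.List.pySetD k (i : Int) c
        | none => k)
      (p.map (aCount dg) ++ List.replicate r.length 0)
      = D.map (aCount dg) := by
  intro r
  induction r with
  | nil => intro p hp; simp [hp]
  | cons x r' ih =>
    intro p hp
    have hxp : x ∉ p := by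
      have h2 := hD
      rw [hp, List.nodup_append] at h2
      intro hx
      exact h2.2.2 x hx x (by simp) rfl
    have hidx : PySem.List.index? D x = some p.length := by
      rw [PySem.List.index?_eq_some_iff]
      exact ⟨p, r', hp, rfl, hxp⟩
    rw [List.foldl_cons]
    simp only [hidx]
    have hset : PySem.List.pySetD (List.map (aCount dg) p ++ List.replicate (x :: r').length 0)
        ((p.length : Nat) : Int) (aCount dg x)
        = List.map (aCount dg) (p ++ [x]) ++ List.replicate r'.length 0 := by
      rw [PySem.List.pySetD_natCast]
      simp [List.set_append, List.replicate_succ]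
    rw [hset]
    exact ih (p ++ [x]) (by rw [hp, List.append_cons])

-- selection spec: first maximum, scanned from the left
def famax (c : Int → Int) : List Int → Option (Int × Int)
  | [] => none
  | x :: t =>
    match famax c t with
    | none => some (c x, x)
    | some p => if c x ≥ p.1 then some (c x, x) else some p

theorem Bfold_aux (c : Int → Int) : ∀ (t : List Int) (bc bd : Int),
    t.foldl (fun b x =>
        let cx := c x
        match b with
        | none => some (cx, x)
        | some p => if cx > p.1 then some (cx, x) else some p) (some (bc, bd))
      = some (match famax c t with
              | none => (bc, bd)
              | some p => if p.1 > bc then p else (bc, bd)) := by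
  intro t
  induction t with
  | nil => intro bc bd; simp [famax]
  | cons x t ih =>
    intro bc bd
    rw [List.foldl_cons]
    show List.foldl _ (if c x > bc then some (c x, x) else some (bc, bd)) t = _
    by_cases hx : c x > bc
    · rw [if_pos hx, ih (c x) x]
      rcases h : famax c t with _ | ⟨p1, p2⟩ <;> simp only [famax, h]
      · simp [hx]
      · split_ifs <;> simp_all <;> omega
    · rw [if_neg hx, ih bc bd]
      rcases h : famax c t with _ | ⟨p1, p2⟩ <;> simp only [famax, h]
      · simp [hx]
      · split_ifs <;> simp_all <;> omega

theorem Bfold_eq_famax (c : Int → Int) (D : List Int) :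
    D.foldl (fun b x =>
        let cx := c x
        match b with
        | none => some (cx, x)
        | some p => if cx > p.1 then some (cx, x) else some p) none
      = famax c D := by
  cases D with
  | nil => rfl
  | cons d t =>
    rw [List.foldl_cons]
    show List.foldl _ (some (c d, d)) t = _
    rw [Bfold_aux]
    rcases h : famax c t with _ | ⟨p1, p2⟩ <;> simp only [famax, h] <;>
      split_ifs <;> (try simp_all) <;> omega

theorem famax_spec (c : Int → Int) : ∀ (D : List Int), D ≠ [] →
    ∃ m d p s, famax c D = some (m, d) ∧ D = p ++ d :: s ∧ c d = m ∧
      (∀ u ∈ p, c u < m) ∧ (∀ u ∈ D, c u ≤ m) := by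
  intro D
  induction D with
  | nil => intro h; exact absurd rfl h
  | cons x t ih =>
    intro _
    by_cases ht : t = []
    · subst ht
      exact ⟨c x, x, [], [], rfl, rfl, rfl, by simp, by simp⟩
    · obtain ⟨m, d, p, s, hfx, hteq, hcd, hplt, hall⟩ := ih ht
      by_cases hx : c x ≥ m
      · refine ⟨c x, x, [], t, ?_, rfl, rfl, by simp, ?_⟩
        · simp [famax, hfx, hx]
        · intro u hu
          rcases List.mem_cons.mp hu with rfl | hu
          · exact le_refl _
          · exact le_trans (hall u hu) hx
      · refine ⟨m, d, x :: p, s, ?_, by rw [hteq]; rfl, hcd, ?_, ?_⟩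
        · simp [famax, hfx, hx]
        · intro u hu
          rcases List.mem_cons.mp hu with rfl | hu
          · omega
          · exact hplt u hu
        · intro u hu
          rcases List.mem_cons.mp hu with rfl | hu
          · omega
          · exact hall u hu

-- ===== VERDICT (by name: the statement is the Claim_ definition above) =====
theorem divisor_copr_w_dig_spec : Claim_equal_divisor_copr_w_dig := by
  intro n _ hpre
  unfold Pre_divisor_copr_w_dig at hpre
  unfold Spec_divisor_copr_w_dig
  have hn0 : (0:Int) ≤ n := by omega
  simp only [divisor_copr_w_dig, divisor_copr_w_dig_alt]
  rw [PySem.List.slice?_none_none_neg_one]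
  simp only [Option.getD_some]
  rw [divisors_eq n hpre]
  set D := (PySem.List.pyRange 2 (n+1) 1).filter (fun x => PySem.Int.mod n x == 0) with hD
  set dg := (PySem.Int.toChars n).map (fun c => (PySem.Int.ofChars? [c]).getD 0) with hdg
  -- frequency table
  have hvals : ∀ y ∈ dg, 0 ≤ y ∧ y < 10 := digits_range n hn0
  obtain ⟨hflen, hfget⟩ := freq_spec dg (List.replicate 10 0) (by simp) hvals
  have hfold : (PySem.Int.toChars n).foldl
      (fun f ch =>
        let d := (PySem.Int.ofChars? [ch]).getD 0
        PySem.List.pySetD f d (PySem.List.pyGetD f d 0 + 1)) (List.replicate 10 (0:Int))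
      = dg.foldl (fun f d => PySem.List.pySetD f d (PySem.List.pyGetD f d 0 + 1))
          (List.replicate 10 (0:Int)) := by
    rw [hdg, List.foldl_map]
  rw [hfold]
  set F := dg.foldl (fun f d => PySem.List.pySetD f d (PySem.List.pyGetD f d 0 + 1))
      (List.replicate 10 (0:Int)) with hF
  have hrep0 : ∀ y : Int, 0 ≤ y → y < 10 → PySem.List.pyGetD (List.replicate 10 (0:Int)) y 0 = 0 := by
    intro y h1 h2
    rw [PySem.List.pyGetD_eq_getElem _ _ h1 (by simp; omega)]
    exact List.getElem_replicate _
  have hfget' : ∀ y : Int, 0 ≤ y → y < 10 → PySem.List.pyGetD F y 0 = (dg.count y : Int) := by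
    intro y h1 h2
    rw [hF, hfget y h1 h2, hrep0 y h1 h2, zero_add]
  have hc : ∀ x, bCount F x = aCount dg x := fun x => (counts_eq x dg F hvals hfget').symm
  -- A's divisor list is nonempty and duplicate-free
  have hmemD : n ∈ D := by
    rw [hD]
    simp only [List.mem_filter, PySem.List.mem_pyRange_one, beq_iff_eq]
    exact ⟨⟨hpre, by omega⟩, (PySem.Int.mod_eq_zero_iff_dvd n n).mpr dvd_rfl⟩
  have hne : D ≠ [] := List.ne_nil_of_mem hmemD
  have hnodup : D.Nodup := by
    rw [hD]; exact (PySem.List.nodup_pyRange_one 2 (n+1)).filter _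
  -- first-maximum decomposition
  obtain ⟨m, d, p, sfx, hfx, hDeq, hcd, hplt, hall⟩ := famax_spec (aCount dg) D hne
  -- A's k-array is the list of counts
  have hk : D.foldl (fun k x =>
      let c := aCount dg x
      match PySem.List.index? D x with
      | some i => PySem.List.pySetD k (i : Int) c
      | none => k) (List.replicate D.length 0) = D.map (aCount dg) := by
    have h := kfold dg D hnodup D [] (by simp)
    simpa using h
  rw [hk]
  -- A's max is m
  have hmax : PySem.List.max? (D.map (aCount dg)) (fun v => v) = some m := by
    rcases hopt : PySem.List.max? (D.map (aCount dg)) (fun v => v) with _ | v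
    · rw [PySem.List.max?_eq_none_iff, List.map_eq_nil_iff] at hopt
      exact absurd hopt hne
    · obtain ⟨u, hu, rfl⟩ := List.mem_map.mp (PySem.List.max?_mem hopt)
      have hmmem : m ∈ D.map (aCount dg) :=
        List.mem_map.mpr ⟨d, by rw [hDeq]; simp, hcd⟩
      have h2 : m ≤ aCount dg u := PySem.List.max?_isMax hopt m hmmem
      rw [le_antisymm (hall u hu) h2]
  rw [hmax]
  simp only [Option.getD_some]
  -- A's argmax index is p.length
  have hkdecomp : D.map (aCount dg) = (p.map (aCount dg)) ++ m :: (sfx.map (aCount dg)) := by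
    rw [hDeq]; simp [hcd]
  have hmnot : m ∉ p.map (aCount dg) := by
    intro hmem'
    obtain ⟨u, hu, hum⟩ := List.mem_map.mp hmem'
    exact absurd hum (ne_of_lt (hplt u hu))
  have hidx : PySem.List.index? (D.map (aCount dg)) m = some (p.map (aCount dg)).length := by
    rw [PySem.List.index?_eq_some_iff]
    exact ⟨_, _, hkdecomp, rfl, hmnot⟩
  rw [hidx]
  simp only [Option.getD_some, List.length_map]
  have hget : PySem.List.pyGetD D ((p.length : Nat) : Int) 0 = d := by
    rw [PySem.List.pyGetD_natCast, hDeq]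
    rw [List.getD_eq_getElem _ _ (by simp)]
    rw [List.getElem_append_right (le_refl p.length)]
    simp
  rw [hget]
  -- B's fold is famax
  have hBfun : (fun (b : Option (Int × Int)) (x : Int) =>
      let c := bCount F x
      match b with
      | none => some (c, x)
      | some p => if c > p.1 then some (c, x) else some p)
      = (fun (b : Option (Int × Int)) (x : Int) =>
      let cx := aCount dg x
      match b with
      | none => some (cx, x)
      | some p => if cx > p.1 then some (cx, x) else some p) := by
    funext b x
    rw [hc x]
  rw [hBfun, Bfold_eq_famax, hfx]
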